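-- pv_equiv track=rewrite | github.com/824zzy/Leetcode | K_DynamicProgramming/TimeDependent/Foobar_Find_the_Access_Code_L2.py | solution
-- ===== SOURCE A (Python) =====
-- from functools import cache
--
-- def solution(A):
--     @cache
--     def dp(i, k):
--         if k==3: return 1
--         if i==len(A): return 0
--         ans = 0
--         for j in range(i+1, len(A)):
--             if A[j]%A[i]==0:
--                 ans += dp(j, k+1)
--         return ans
--     return dp(0, 1)
-- ===== SOURCE B (Python) =====
-- def solution(A):
--     # One forward pass: keep the values at indices >=1 divisible by A[0] seen so far
--     # ("middles"); each new element closes a chain with every stored middle dividing it.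
--     if not A:
--         return 0
--     head = A[0]
--     total = 0
--     mids = []
--     for x in A[1:]:
--         total += sum(1 for m in mids if x % m == 0)
--         if x % head == 0:
--             mids.append(x)
--     return total
-- ===== Notes on version B (the rewrite author's own statement) =====
-- stated objective: simpler
-- what changed: Replaces the memoized top-down recursion dp(i,k) with a single explicit forward pass that keeps the list of chain 'middle' values (elements after index 0 divisible by A[0]) and, for each new element, counts the stored middles dividing it; no recursion, no cache.
import Mathlib
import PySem

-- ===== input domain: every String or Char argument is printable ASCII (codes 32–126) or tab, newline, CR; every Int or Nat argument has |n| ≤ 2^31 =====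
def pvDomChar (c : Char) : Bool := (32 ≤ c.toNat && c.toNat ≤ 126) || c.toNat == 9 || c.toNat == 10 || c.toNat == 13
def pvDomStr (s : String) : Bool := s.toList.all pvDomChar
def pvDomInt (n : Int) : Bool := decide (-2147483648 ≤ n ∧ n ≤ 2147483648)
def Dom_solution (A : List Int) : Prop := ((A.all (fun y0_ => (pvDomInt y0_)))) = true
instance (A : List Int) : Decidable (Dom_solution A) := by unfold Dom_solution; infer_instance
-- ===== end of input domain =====

-- B replaces A's memoized dp(i,k) recursion by one explicit forward pass with an accumulator; return values agree wherever A returns.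

-- ===== PORT A =====
-- dp(i, k) of A; the fuel only makes the recursion structural (A's recursion depth from dp(0,1) is ≤ 2, so fuel 3 is never exhausted on the calls `solution` makes).
def dpA (A : List Int) (fuel : Nat) (i k : Int) : Int :=
  match fuel with
  | 0 => 0
  | f + 1 =>
    if k = 3 then 1
    else if i = PySem.List.len A then 0
    else (PySem.List.pyRange (i + 1) (PySem.List.len A)).foldl
      (fun ans j =>
        if PySem.Int.mod (PySem.List.pyGetD A j 0) (PySem.List.pyGetD A i 0) = 0
        then ans + dpA A f j (k + 1) else ans) 0

def solution (A : List Int) : Int := dpA A 3 0 1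

-- ===== PORT B =====
def solution_alt (A : List Int) : Int :=
  match A with
  | [] => 0
  | head :: rest =>
    (rest.foldl
      (fun (st : Int × List Int) x =>
        (st.1 + ((st.2.countP (fun m => PySem.Int.mod x m = 0) : Nat) : Int),
         if PySem.Int.mod x head = 0 then st.2 ++ [x] else st.2))
      ((0 : Int), ([] : List Int))).1

-- ===== PRECONDITION & SPEC =====
-- Pre_ excludes exactly the inputs on which Python A raises ZeroDivisionError: a 0 anywhere before the last element is always reached as a modulus divisor.
def Pre_solution (A : List Int) : Prop := (0 : Int) ∉ A.dropLast
instance (A : List Int) : Decidable (Pre_solution A) := by unfold Pre_solution; infer_instance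
def pvWitness_solution : List Int := ([1, 2, 4] : List Int)

def Spec_solution (A : List Int) (out : Int) : Prop := out = solution_alt A
instance (A : List Int) (out : Int) : Decidable (Spec_solution A out) := by unfold Spec_solution; infer_instance

-- ===== CLAIM (what is proved, stated in full; the proofs are below) =====
def Claim_equal_solution : Prop := ∀ (A : List Int), Dom_solution A → Pre_solution A → Spec_solution A (solution A)

-- ===== LEMMAS AND PROOFS =====

-- one-step unfolding of dpA at a non-base call (fuel left as a variable so inner calls stay folded)
lemma dpA_eq (A : List Int) (f : Nat) (i k : Int) (hk : ¬ k = 3) (hi : ¬ i = PySem.List.len A) :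
    dpA A (f + 1) i k
      = (PySem.List.pyRange (i + 1) (PySem.List.len A)).foldl
          (fun ans j =>
            if PySem.Int.mod (PySem.List.pyGetD A j 0) (PySem.List.pyGetD A i 0) = 0
            then ans + dpA A f j (k + 1) else ans) 0 := by
  rw [dpA]
  rw [if_neg hk, if_neg hi]

-- common specification: Fspec h xs = Σ over positions j of xs with h ∣ xs[j] of the number of later positions k with xs[j] ∣ xs[k]
def Fspec (h : Int) : List Int → Int
  | [] => 0
  | x :: xs =>
    (if PySem.Int.mod x h = 0 then ((xs.countP (fun y => PySem.Int.mod y x = 0) : Nat) : Int) else 0)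
      + Fspec h xs

-- sum over the stored middles of how many elements of xs they divide
def Gmid : List Int → List Int → Int
  | [], _ => 0
  | m :: ms, xs => ((xs.countP (fun y => PySem.Int.mod y m = 0) : Nat) : Int) + Gmid ms xs

lemma Gmid_nil (mids : List Int) : Gmid mids [] = 0 := by
  induction mids with
  | nil => rfl
  | cons m ms ih => simp [Gmid, ih]

lemma Gmid_cons (mids : List Int) (x : Int) (xs : List Int) :
    Gmid mids (x :: xs)
      = ((mids.countP (fun m => PySem.Int.mod x m = 0) : Nat) : Int) + Gmid mids xs := by
  induction mids with
  | nil => simp [Gmid]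
  | cons m ms ih =>
    simp only [Gmid, List.countP_cons, ih]
    by_cases hm : PySem.Int.mod x m = 0 <;> simp [hm] <;> ring

lemma Gmid_append_singleton (mids : List Int) (a : Int) (xs : List Int) :
    Gmid (mids ++ [a]) xs
      = Gmid mids xs + ((xs.countP (fun y => PySem.Int.mod y a = 0) : Nat) : Int) := by
  induction mids with
  | nil => simp [Gmid]
  | cons m ms ih => simp only [List.cons_append, Gmid, ih]; ring

lemma B_loop (h : Int) (xs : List Int) : ∀ (t : Int) (mids : List Int),
    (xs.foldl
      (fun (st : Int × List Int) x =>
        (st.1 + ((st.2.countP (fun m => PySem.Int.mod x m = 0) : Nat) : Int),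
         if PySem.Int.mod x h = 0 then st.2 ++ [x] else st.2))
      (t, mids)).1 = t + Gmid mids xs + Fspec h xs := by
  induction xs with
  | nil => intro t mids; simp [Gmid_nil, Fspec]
  | cons x xs ih =>
    intro t mids
    simp only [List.foldl_cons, Fspec, Gmid_cons]
    rw [ih]
    by_cases hx : PySem.Int.mod x h = 0
    · simp only [hx, Gmid_append_singleton, if_pos]; ring
    · simp only [hx, if_false]; ring

lemma solution_alt_eq (h : Int) (rest : List Int) :
    solution_alt (h :: rest) = Fspec h rest := by
  simp only [solution_alt]
  rw [B_loop h rest 0 []]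
  simp [Gmid]

-- A-side, k = 2 level: the inner loop counts the divisible later elements
lemma dpA_inner (A : List Int) (d : Int) : ∀ (n : Nat) (s : Nat) (acc : Int),
    A.length ≤ s + n →
    (PySem.List.pyRange (s : Int) (PySem.List.len A)).foldl
      (fun ans j =>
        if PySem.Int.mod (PySem.List.pyGetD A j 0) d = 0
        then ans + dpA A 1 j 3 else ans) acc
    = acc + (((A.drop s).countP (fun y => PySem.Int.mod y d = 0) : Nat) : Int) := by
  intro n
  induction n with
  | zero =>
    intro s acc hs
    rw [PySem.List.pyRange_one_eq_nil (by simp [PySem.List.len]; omega),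
        List.drop_eq_nil_of_le (by omega)]
    simp
  | succ n ih =>
    intro s acc hs
    by_cases hlt : s < A.length
    · rw [PySem.List.pyRange_one_cons (by simp [PySem.List.len]; exact_mod_cast hlt)]
      simp only [List.foldl_cons]
      have hcast : ((s : Int) + 1) = ((s + 1 : Nat) : Int) := by push_cast; ring
      rw [hcast, ih (s + 1) _ (by omega)]
      rw [PySem.List.pyGetD_natCast, List.getD_eq_getElem A 0 hlt,
          List.drop_eq_getElem_cons hlt]
      have h3 : dpA A 1 (s : Int) 3 = 1 := rfl
      rw [h3]
      simp only [List.countP_cons]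
      by_cases hd : PySem.Int.mod A[s] d = 0 <;> simp [hd] <;> try ring
    · rw [PySem.List.pyRange_one_eq_nil (by simp [PySem.List.len]; omega),
          List.drop_eq_nil_of_le (by omega)]
      simp

lemma dpA_mid (A : List Int) (s : Nat) (hlt : s < A.length) :
    dpA A 2 (s : Int) 2
      = (((A.drop (s + 1)).countP (fun y => PySem.Int.mod y (A[s]) = 0) : Nat) : Int) := by
  rw [show (2 : Nat) = 1 + 1 from rfl,
      dpA_eq A 1 (s : Int) 2 (by norm_num) (by simp [PySem.List.len]; omega)]
  have hcast : ((s : Int) + 1) = ((s + 1 : Nat) : Int) := by push_cast; ring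
  simp only [show (2 : Int) + 1 = 3 from rfl]
  rw [hcast, dpA_inner A _ A.length (s + 1) 0 (by omega)]
  rw [PySem.List.pyGetD_natCast, List.getD_eq_getElem A 0 hlt]
  simp

-- A-side, outer level: the k = 1 loop accumulates Fspec over the remaining suffix
lemma dpA_outer (A : List Int) (h : Int) : ∀ (n : Nat) (s : Nat) (acc : Int),
    A.length ≤ s + n →
    (PySem.List.pyRange (s : Int) (PySem.List.len A)).foldl
      (fun ans j =>
        if PySem.Int.mod (PySem.List.pyGetD A j 0) h = 0
        then ans + dpA A 2 j 2 else ans) acc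
    = acc + Fspec h (A.drop s) := by
  intro n
  induction n with
  | zero =>
    intro s acc hs
    rw [PySem.List.pyRange_one_eq_nil (by simp [PySem.List.len]; omega),
        List.drop_eq_nil_of_le (by omega)]
    simp [Fspec]
  | succ n ih =>
    intro s acc hs
    by_cases hlt : s < A.length
    · rw [PySem.List.pyRange_one_cons (by simp [PySem.List.len]; exact_mod_cast hlt)]
      simp only [List.foldl_cons]
      have hcast : ((s : Int) + 1) = ((s + 1 : Nat) : Int) := by push_cast; ring
      rw [hcast, ih (s + 1) _ (by omega)]
      rw [PySem.List.pyGetD_natCast, List.getD_eq_getElem A 0 hlt]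
      rw [dpA_mid A s hlt]
      rw [List.drop_eq_getElem_cons hlt]
      simp only [Fspec]
      by_cases hd : PySem.Int.mod A[s] h = 0 <;> simp [hd] <;> try ring
    · rw [PySem.List.pyRange_one_eq_nil (by simp [PySem.List.len]; omega),
          List.drop_eq_nil_of_le (by omega)]
      simp [Fspec]

lemma solution_eq (A : List Int) : solution A = solution_alt A := by
  match A with
  | [] => rfl
  | h :: rest =>
    rw [solution_alt_eq]
    show dpA (h :: rest) 3 0 1 = Fspec h rest
    rw [show (3 : Nat) = 2 + 1 from rfl,
        dpA_eq (h :: rest) 2 0 1 (by norm_num)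
          (by simp [PySem.List.len]; omega)]
    have h0 : PySem.List.pyGetD (h :: rest) (0 : Int) 0 = h := by
      simp [PySem.List.pyGetD]
    have h01 : ((0 : Int) + 1) = ((1 : Nat) : Int) := by norm_num
    simp only [show (1 : Int) + 1 = 2 from rfl]
    rw [h0, h01, dpA_outer (h :: rest) h (h :: rest).length 1 0 (by omega)]
    simp

-- ===== VERDICT (by name: the statement is the Claim_ definition above) =====
theorem solution_spec : Claim_equal_solution := by
  intro A _ _
  unfold Spec_solution
  exact solution_eq A
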